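-- pv_equiv track=rewrite | github.com/risethesummer/AI_projects | Proj2/CNF/generateCNF.py | generate_clauses
-- ===== SOURCE A (Python) =====
-- def get_trueClauses(depth, sub_list, pos, res, line):
--     if depth == 0:
--         res.append([line[i] for i in range(len(line))])
--         return
--
--     for i in range(pos, len(sub_list)):
--         line.append(sub_list[i])
--         get_trueClauses(depth - 1, sub_list, i + 1,res, line)
--         line.pop()
--
-- def generate_clause(sub_list, true_clause):
--
--     final_clause = []
--
--     false_clause = []
--     for ele in sub_list:
--         if ele not in true_clause:
--             false_clause.append(ele)
--
--     for ele in true_clause: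
--         temp = [false_clause[i] for i in range(len(false_clause))]
--         temp.append(ele)
--         final_clause.append(temp)
--
--     for ele in false_clause:
--         temp = [true_clause[i] * -1 for i in range(len(true_clause))]
--         temp.append(ele*-1)
--         final_clause.append(temp)
--
--     return final_clause
--
-- def generate_clauses(input, sub_list):
--     res = []
--     true_clauses = []
--     line =[]
--
--     get_trueClauses(input, sub_list, 0, true_clauses, line)
--
--     for i in range(len(true_clauses)):
--         res += generate_clause(sub_list, true_clauses[i])
--
--     return res
-- ===== SOURCE B (Python) =====
-- def generate_clauses(input, sub_list):
--     # Iterative DP over the list (right to left): table[j] holds the size-j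
--     # combinations of the suffix processed so far, in lexicographic index order.
--     if input < 0 or input > len(sub_list):
--         return []
--     k = input
--     table = [[[]]] + [[] for _ in range(k)]
--     for x in reversed(sub_list):
--         for j in range(k, 0, -1):
--             table[j] = [[x] + c for c in table[j - 1]] + table[j]
--     res = []
--     for tc in table[k]:
--         fc = [e for e in sub_list if e not in tc]
--         for e in tc:
--             res.append(fc + [e])
--         for e in fc:
--             res.append([-t for t in tc] + [-e])
--     return res
-- ===== Notes on version B (the rewrite author's own statement) =====
-- stated objective: alternative
-- what changed: Replaces the mutating backtracking recursion over (depth,pos,res,line) with an iterative dynamic-programming table over the list (table[j] = size-j combinations of the processed suffix) and builds each clause block with comprehensions/maps instead of index-copy loops.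
import Mathlib
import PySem

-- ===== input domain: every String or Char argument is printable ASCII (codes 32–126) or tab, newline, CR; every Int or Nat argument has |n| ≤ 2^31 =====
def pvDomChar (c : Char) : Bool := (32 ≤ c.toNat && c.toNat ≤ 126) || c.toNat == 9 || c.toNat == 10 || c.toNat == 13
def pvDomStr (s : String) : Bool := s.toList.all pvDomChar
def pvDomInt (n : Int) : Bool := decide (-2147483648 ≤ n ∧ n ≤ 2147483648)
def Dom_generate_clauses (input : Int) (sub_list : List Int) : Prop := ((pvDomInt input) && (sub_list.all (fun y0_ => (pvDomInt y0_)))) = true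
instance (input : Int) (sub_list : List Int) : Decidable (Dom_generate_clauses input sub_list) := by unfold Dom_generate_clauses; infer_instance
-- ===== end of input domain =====

-- B replaces A's mutating backtracking recursion with an iterative DP table of
-- suffix combinations (objective: alternative); same cost, same return value.

-- ===== PORT A =====
-- get_trueClauses mutates res/line in Python; the port threads res explicitly
-- (line is restored by the pop, so only res flows out).  The loop
-- 'for i in range(pos, len(sub_list))' runs over the suffix of sub_list from
-- pos, so the port recurses structurally on that suffix; the recursive call's
-- own 'depth == 0' test is inlined at the call site.
def gtcLoop : Int → List Int → List (List Int) → List Int → List (List Int)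
  | _, [], res, _ => res
  | depth, x :: rest, res, line =>
      gtcLoop depth rest
        (if depth - 1 == 0 then res ++ [line ++ [x]]
         else gtcLoop (depth - 1) rest res (line ++ [x]))
        line

def get_trueClauses (depth : Int) (suffix : List Int)
    (res : List (List Int)) (line : List Int) : List (List Int) :=
  if depth == 0 then res ++ [line] else gtcLoop depth suffix res line

def generate_clause (sub_list : List Int) (true_clause : List Int) : List (List Int) :=
  let false_clause :=
    sub_list.foldl (fun fc ele => if !(true_clause.contains ele) then fc ++ [ele] else fc) []
  let after_true :=
    true_clause.foldl (fun acc ele => acc ++ [false_clause ++ [ele]]) []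
  false_clause.foldl
    (fun acc ele => acc ++ [true_clause.map (fun t => t * -1) ++ [ele * -1]]) after_true

def generate_clauses (input : Int) (sub_list : List Int) : List (List Int) :=
  let true_clauses := get_trueClauses input sub_list [] []
  true_clauses.foldl (fun res tc => res ++ generate_clause sub_list tc) []

-- ===== PORT B =====
-- table step: new[0] = old[0]; new[j] = map (x :: ·) old[j-1] ++ old[j]
-- (the Python loop runs j from k down to 1, so old[j-1] is still unupdated).
def stepTable (x : Int) (t : List (List (List Int))) : List (List (List Int)) :=
  match t with
  | [] => []
  | t0 :: rest =>
      t0 :: List.zipWith (fun prev cur => prev.map (fun c => x :: c) ++ cur) (t0 :: rest) rest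

def generate_clauses_alt (input : Int) (sub_list : List Int) : List (List Int) :=
  if input < 0 || input > (sub_list.length : Int) then []
  else
    let k := input.toNat
    let table := sub_list.foldr stepTable ([[]] :: List.replicate k [])
    let combos := table.getD k []
    combos.foldl
      (fun res tc =>
        let fc := sub_list.filter (fun e => !(tc.contains e))
        res ++ tc.map (fun e => fc ++ [e])
            ++ fc.map (fun e => tc.map (fun t => -t) ++ [-e]))
      []

-- ===== PRECONDITION & SPEC =====
def Spec_generate_clauses (input : Int) (sub_list : List Int) (out : List (List Int)) : Prop := out = generate_clauses_alt input sub_list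
instance (input : Int) (sub_list : List Int) (out : List (List Int)) : Decidable (Spec_generate_clauses input sub_list out) := by unfold Spec_generate_clauses; infer_instance

-- ===== CLAIM (what is proved, stated in full; the proofs are below) =====
def Claim_equal_generate_clauses : Prop := ∀ (input : Int) (sub_list : List Int), Dom_generate_clauses input sub_list → Spec_generate_clauses input sub_list (generate_clauses input sub_list)

-- ===== LEMMAS AND PROOFS =====

-- reference combinations (size d, Int counter), lexicographic in index order
def C (d : Int) : List Int → List (List Int)
  | [] => if d == 0 then [[]] else []
  | x :: r => if d == 0 then [[]] else (C (d - 1) r).map (fun c => x :: c) ++ C d r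

-- Nat-indexed combinations (what B's table computes)
def N : Nat → List Int → List (List Int)
  | 0, _ => [[]]
  | _ + 1, [] => []
  | j + 1, x :: r => (N j r).map (fun c => x :: c) ++ N (j + 1) r

lemma C_eq_N (d : Int) (hd : 0 ≤ d) (xs : List Int) : C d xs = N d.toNat xs := by
  induction xs generalizing d with
  | nil =>
    by_cases h : d = 0
    · subst h; simp [C, N]
    · have : d.toNat ≠ 0 := by omega
      obtain ⟨j, hj⟩ := Nat.exists_eq_succ_of_ne_zero this
      simp [C, N, h, hj]
  | cons x r ih =>
    by_cases h : d = 0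
    · subst h; simp [C, N]
    · have h1 : (0:Int) ≤ d - 1 := by omega
      have : d.toNat ≠ 0 := by omega
      obtain ⟨j, hj⟩ := Nat.exists_eq_succ_of_ne_zero this
      have hj1 : (d - 1).toNat = j := by omega
      simp [C, N, h, hj, ih (d-1) h1, ih d hd, hj1]

lemma C_neg (d : Int) (hd : d < 0) (xs : List Int) : C d xs = [] := by
  induction xs generalizing d with
  | nil => simp [C]; omega
  | cons x r ih => simp [C, show ¬ (d == 0) = true by simp; omega, ih (d-1) (by omega), ih d hd]

lemma N_big (j : Nat) (xs : List Int) (h : xs.length < j) : N j xs = [] := by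
  induction xs generalizing j with
  | nil => obtain ⟨i, rfl⟩ := Nat.exists_eq_succ_of_ne_zero (by omega : j ≠ 0); simp [N]
  | cons x r ih =>
    obtain ⟨i, rfl⟩ := Nat.exists_eq_succ_of_ne_zero (by omega : j ≠ 0)
    simp at h
    simp [N, ih i (by omega), ih (i+1) (by omega)]

lemma C_zero (xs : List Int) : C 0 xs = [[]] := by cases xs <;> simp [C]

-- A's recursion computes the map of C over the suffix, appended to res.
lemma gtcLoop_eq (xs : List Int) : ∀ (d : Int), d ≠ 0 →
    ∀ (res : List (List Int)) (line : List Int),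
    gtcLoop d xs res line = res ++ (C d xs).map (fun c => line ++ c) := by
  induction xs with
  | nil => intro d hd res line; simp [gtcLoop, C, show ¬ (d == 0) = true by simpa using hd]
  | cons x rest ih =>
    intro d hd res line
    rw [gtcLoop]
    have hres' : (if d - 1 == 0 then res ++ [line ++ [x]]
        else gtcLoop (d - 1) rest res (line ++ [x]))
        = res ++ (C (d - 1) rest).map (fun c => (line ++ [x]) ++ c) := by
      by_cases h : d - 1 = 0
      · rw [if_pos (by simpa using h), h, C_zero]; simp
      · rw [if_neg (by simpa using h), ih (d - 1) h]
    rw [hres', ih d hd]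
    simp [C, show ¬ (d == 0) = true by simpa using hd, List.map_map, Function.comp_def,
      List.append_assoc]

lemma gtc_eq (d : Int) (xs : List Int) (res : List (List Int)) (line : List Int) :
    get_trueClauses d xs res line = res ++ (C d xs).map (fun c => line ++ c) := by
  rw [get_trueClauses]
  by_cases h : d = 0
  · subst h; rw [if_pos (by simp), C_zero]; simp
  · rw [if_neg (by simpa using h)]; exact gtcLoop_eq xs d h res line

-- B's table is [N 0 xs, N 1 xs, …, N k xs].
lemma table_eq (xs : List Int) (k : Nat) :
    xs.foldr stepTable ([[]] :: List.replicate k []) =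
      (List.range (k + 1)).map (fun j => N j xs) := by
  induction xs with
  | nil =>
    apply List.ext_getElem
    · simp
    · intro j h1 h2
      simp only [List.getElem_map, List.getElem_range]
      match j, h1 with
      | 0, _ => simp [N]
      | j + 1, h1 =>
        simp at h1
        simp [N, List.getElem_cons_succ, List.getElem_replicate (by simpa using h1)]
  | cons x r ih =>
    simp only [List.foldr_cons, ih]
    have hr : ∀ m : Nat, (List.range (m + 1)).map (fun j => N j r) =
        N 0 r :: (List.range m).map (fun j => N (j+1) r) := by
      intro m
      rw [List.range_succ_eq_map]
      simp [List.map_map, Function.comp_def]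
    rw [hr k, stepTable]
    apply List.ext_getElem
    · simp [List.length_zipWith]
    · intro j h1 h2
      match j with
      | 0 => simp [N]
      | j + 1 =>
        simp only [List.getElem_cons_succ]
        rw [List.getElem_zipWith]
        simp only [List.length_cons] at h1
        match j with
        | 0 => simp [N]
        | j + 1 =>
          simp only [List.getElem_cons_succ, List.getElem_map, List.getElem_range]
          simp [N]

-- A's clause builder equals B's per-combination block.
lemma clause_eq (xs tc : List Int) :
    generate_clause xs tc =
      (let fc := xs.filter (fun e => !(tc.contains e))
       tc.map (fun e => fc ++ [e]) ++ fc.map (fun e => tc.map (fun t => -t) ++ [-e])) := by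
  simp only [generate_clause]
  rw [PySem.List.foldl_append_if_eq_filter]
  rw [PySem.List.foldl_append_singleton_eq_map]
  rw [PySem.List.foldl_append_singleton_eq_map]
  simp

-- ===== VERDICT (by name: the statement is the Claim_ definition above) =====
theorem generate_clauses_spec : Claim_equal_generate_clauses := by
  intro input sub_list _
  unfold Spec_generate_clauses generate_clauses generate_clauses_alt
  have hA := gtc_eq input sub_list [] []
  simp only [List.nil_append] at hA
  rw [hA]
  by_cases hneg : input < 0
  · rw [if_pos (by simp [hneg]), C_neg input hneg]
    simp
  · push Not at hneg
    by_cases hbig : input > (sub_list.length : Int)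
    · rw [if_pos (by simp [hbig]), C_eq_N input hneg,
        N_big input.toNat sub_list (by omega)]
      simp
    · rw [if_neg (by simp; omega)]
      simp only [table_eq sub_list input.toNat]
      have hget : ((List.range (input.toNat + 1)).map (fun j => N j sub_list)).getD input.toNat []
          = N input.toNat sub_list := by
        rw [List.getD_eq_getElem?_getD, List.getElem?_map]
        simp
      rw [hget, C_eq_N input hneg]
      simp only [List.map_id']
      congr 1
      funext res tc
      rw [clause_eq]
      simp [List.append_assoc]
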